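-- pv_equiv track=rewrite | github.com/AngelaVC/ProfReviews | scrapeMyProf.py | pronoun_count
-- ===== SOURCE A (Python) =====
-- from collections import Counter
--
-- def pronoun_count(text):
--     pronouns={
--         'she':'female',
--         'shes':'female',
--         'her':'female',
--         'hers':'female',
--         'herself':'female',
--         'ms':'female',
--         'mrs':'female',
--         'miss':'female',
--         'he':'male',
--         'hes':'male',
--         'his':'male',
--         'him':'male',
--         'himself':'male',
--         'mr':'male'
--     }
--     genderCount = Counter({'female':0,'male':0})
--     wordCount = Counter(text.split())
--     for pronoun in list(pronouns.keys()):
--         genderCount.update({pronouns[pronoun]:wordCount[pronoun]})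
--     return genderCount
-- ===== SOURCE B (Python) =====
-- from collections import Counter
--
-- FEMALE = frozenset(['she', 'shes', 'her', 'hers', 'herself', 'ms', 'mrs', 'miss'])
-- MALE = frozenset(['he', 'hes', 'his', 'him', 'himself', 'mr'])
--
-- def pronoun_count(text):
--     female = male = 0
--     for word in text.split():
--         if word in FEMALE:
--             female += 1
--         elif word in MALE:
--             male += 1
--     return Counter({'female': female, 'male': male})
-- ===== Notes on version B (the rewrite author's own statement) =====
-- stated objective: simpler
-- what changed: B drops A's full word-frequency Counter and its loop over the 14-key pronoun dict, replacing them with a single pass over the split words that keeps two plain integer tallies (membership in two fixed pronoun sets) and builds the two-key Counter at the end.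
import Mathlib
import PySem

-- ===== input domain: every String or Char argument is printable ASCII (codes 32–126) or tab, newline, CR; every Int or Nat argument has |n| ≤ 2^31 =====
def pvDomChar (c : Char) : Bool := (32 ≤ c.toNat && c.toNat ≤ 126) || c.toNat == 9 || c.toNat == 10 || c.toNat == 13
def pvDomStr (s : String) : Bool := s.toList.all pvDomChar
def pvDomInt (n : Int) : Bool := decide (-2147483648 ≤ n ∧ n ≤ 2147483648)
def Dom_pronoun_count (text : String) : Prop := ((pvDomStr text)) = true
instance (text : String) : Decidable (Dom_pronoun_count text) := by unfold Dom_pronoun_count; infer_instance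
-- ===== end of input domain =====

-- B replaces A's word-frequency Counter plus loop over the 14-key pronoun dict by one pass over the
-- split words with two integer tallies (objective: simpler).

-- ===== PORT A =====
def pronounsList : List (String × String) :=
  [("she","female"),("shes","female"),("her","female"),("hers","female"),
   ("herself","female"),("ms","female"),("mrs","female"),("miss","female"),
   ("he","male"),("hes","male"),("his","male"),("him","male"),
   ("himself","male"),("mr","male")]

def pronoun_count (text : String) : List (String × Int) :=
  let pronouns : PySem.Dict String String := ⟨pronounsList⟩
  let genderCount : PySem.Dict String Int := ⟨[("female", 0), ("male", 0)]⟩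
  let wordCount : PySem.Dict String Int := PySem.Dict.counter (PySem.Str.split₀ text)
  -- 'pronouns[pronoun]' always hits (the keys iterated are the dict's own keys); getD "" is that lookup
  let final := pronouns.keys.foldl
    (fun gc p => gc.modify (pronouns.getD p "") 0 (fun v => v + wordCount.getD p 0))
    genderCount
  final.items

-- ===== PORT B =====
def femaleList : List String := ["she", "shes", "her", "hers", "herself", "ms", "mrs", "miss"]
def maleList : List String := ["he", "hes", "his", "him", "himself", "mr"]

def pronoun_count_alt (text : String) : List (String × Int) :=
  let fm := (PySem.Str.split₀ text).foldl
    (fun (fm : Int × Int) w =>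
      if femaleList.contains w then (fm.1 + 1, fm.2)
      else if maleList.contains w then (fm.1, fm.2 + 1)
      else fm)
    (0, 0)
  [("female", fm.1), ("male", fm.2)]

-- ===== PRECONDITION & SPEC =====
def Spec_pronoun_count (text : String) (out : List (String × Int)) : Prop := out = pronoun_count_alt text
instance (text : String) (out : List (String × Int)) : Decidable (Spec_pronoun_count text out) := by unfold Spec_pronoun_count; infer_instance

-- ===== CLAIM (what is proved, stated in full; the proofs are below) =====
def Claim_equal_pronoun_count : Prop := ∀ (text : String), Dom_pronoun_count text → Spec_pronoun_count text (pronoun_count text)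

-- ===== LEMMAS AND PROOFS =====

-- B's one-pass fold keeps a running (female, male) tally over the words.
lemma foldB_eq (ws : List String) (a b : Int) :
    ws.foldl
      (fun (fm : Int × Int) w =>
        if femaleList.contains w then (fm.1 + 1, fm.2)
        else if maleList.contains w then (fm.1, fm.2 + 1)
        else fm)
      (a, b)
    = (a + (ws.countP (fun w => femaleList.contains w) : Int),
       b + (ws.countP (fun w => !femaleList.contains w && maleList.contains w) : Int)) := by
  induction ws generalizing a b with
  | nil => simp
  | cons w t ih =>
    by_cases hf : femaleList.contains w
    · simp only [List.foldl_cons, hf, if_pos, ih, List.countP_cons, Bool.not_true,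
        Bool.false_and, if_neg, Bool.false_eq_true, not_false_eq_true,
        Prod.mk.injEq]
      constructor <;> push_cast <;> ring
    · by_cases hm : maleList.contains w
      · simp only [List.foldl_cons, hf, hm, Bool.false_eq_true, not_false_eq_true, if_neg,
          if_pos, ih, List.countP_cons, Bool.not_false, Bool.true_and, Prod.mk.injEq]
        constructor <;> push_cast <;> ring
      · simp only [List.foldl_cons, hf, hm, Bool.false_eq_true, not_false_eq_true, if_neg,
          ih, List.countP_cons, Bool.and_false]
        simp

-- a word matched by maleList is never matched by femaleList (the two literal lists are disjoint)
lemma male_not_female (w : String) (h : maleList.contains w = true) :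
    femaleList.contains w = false := by
  simp only [maleList, List.contains_cons, List.contains_nil, Bool.or_false,
    Bool.or_eq_true, beq_iff_eq] at h
  rcases h with h | h | h | h | h | h <;> subst h <;> decide

-- counting elements that equal p or lie in L (p ∉ L) splits into the two separate counts
lemma countP_or (p : String) (L : List String) (hp : p ∉ L) (ws : List String) :
    ws.countP (fun x => decide (x = p ∨ x ∈ L))
      = ws.count p + ws.countP (fun x => decide (x ∈ L)) := by
  induction ws with
  | nil => simp
  | cons w t iht =>
    simp only [List.countP_cons, List.count_cons, iht]
    by_cases hw : w = p
    · subst hw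
      have hL : w ∉ L := hp
      simp [hL]
      omega
    · have h2 : (p == w) = false := by
        simp
        exact Ne.symm hw
      by_cases hm : w ∈ L <;> simp [hw, h2, hm]
      omega

-- counting words that lie in a duplicate-free list = the summed per-word counts
lemma countP_contains_eq_sum (L : List String) (hL : L.Nodup) (ws : List String) :
    (ws.countP (fun w => L.contains w) : Int)
      = (L.map (fun p => (ws.count p : Int))).sum := by
  induction L with
  | nil => simp
  | cons p L ih =>
    rcases List.nodup_cons.mp hL with ⟨hp, hL'⟩
    have step : ws.countP (fun w => (p :: L).contains w)
        = ws.count p + ws.countP (fun w => L.contains w) := by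
      simp only [List.contains_eq_mem, List.mem_cons]
      exact countP_or p L hp ws
    rw [step]
    push_cast
    rw [ih hL']
    simp only [List.map_cons, List.sum_cons]

set_option maxHeartbeats 1000000 in
-- A's fold over the 14 pronoun keys: the final two-entry items list of per-pronoun totals.
lemma foldA_items (wc : PySem.Dict String Int) :
    ((⟨pronounsList⟩ : PySem.Dict String String).keys.foldl
      (fun gc p => gc.modify ((⟨pronounsList⟩ : PySem.Dict String String).getD p "") 0
        (fun v => v + wc.getD p 0))
      (⟨[("female", (0:Int)), ("male", 0)]⟩ : PySem.Dict String Int)).items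
    = [("female", 0 + wc.getD "she" 0 + wc.getD "shes" 0 + wc.getD "her" 0 + wc.getD "hers" 0
          + wc.getD "herself" 0 + wc.getD "ms" 0 + wc.getD "mrs" 0 + wc.getD "miss" 0),
       ("male", 0 + wc.getD "he" 0 + wc.getD "hes" 0 + wc.getD "his" 0 + wc.getD "him" 0
          + wc.getD "himself" 0 + wc.getD "mr" 0)] := by
  have hk : (⟨pronounsList⟩ : PySem.Dict String String).keys
      = ["she","shes","her","hers","herself","ms","mrs","miss",
         "he","hes","his","him","himself","mr"] := by
      simp [pronounsList, PySem.Dict.keys_mk]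
  have gf1 : (⟨pronounsList⟩ : PySem.Dict String String).getD "she" "" = "female" := by
      simp [pronounsList, PySem.Dict.getD, PySem.Dict.get?_mk_cons]
  have gf2 : (⟨pronounsList⟩ : PySem.Dict String String).getD "shes" "" = "female" := by
      simp [pronounsList, PySem.Dict.getD, PySem.Dict.get?_mk_cons]
  have gf3 : (⟨pronounsList⟩ : PySem.Dict String String).getD "her" "" = "female" := by
      simp [pronounsList, PySem.Dict.getD, PySem.Dict.get?_mk_cons]
  have gf4 : (⟨pronounsList⟩ : PySem.Dict String String).getD "hers" "" = "female" := by
      simp [pronounsList, PySem.Dict.getD, PySem.Dict.get?_mk_cons]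
  have gf5 : (⟨pronounsList⟩ : PySem.Dict String String).getD "herself" "" = "female" := by
      simp [pronounsList, PySem.Dict.getD, PySem.Dict.get?_mk_cons]
  have gf6 : (⟨pronounsList⟩ : PySem.Dict String String).getD "ms" "" = "female" := by
      simp [pronounsList, PySem.Dict.getD, PySem.Dict.get?_mk_cons]
  have gf7 : (⟨pronounsList⟩ : PySem.Dict String String).getD "mrs" "" = "female" := by
      simp [pronounsList, PySem.Dict.getD, PySem.Dict.get?_mk_cons]
  have gf8 : (⟨pronounsList⟩ : PySem.Dict String String).getD "miss" "" = "female" := by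
      simp [pronounsList, PySem.Dict.getD, PySem.Dict.get?_mk_cons]
  have gm1 : (⟨pronounsList⟩ : PySem.Dict String String).getD "he" "" = "male" := by
      simp [pronounsList, PySem.Dict.getD, PySem.Dict.get?_mk_cons]
  have gm2 : (⟨pronounsList⟩ : PySem.Dict String String).getD "hes" "" = "male" := by
      simp [pronounsList, PySem.Dict.getD, PySem.Dict.get?_mk_cons]
  have gm3 : (⟨pronounsList⟩ : PySem.Dict String String).getD "his" "" = "male" := by
      simp [pronounsList, PySem.Dict.getD, PySem.Dict.get?_mk_cons]
  have gm4 : (⟨pronounsList⟩ : PySem.Dict String String).getD "him" "" = "male" := by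
      simp [pronounsList, PySem.Dict.getD, PySem.Dict.get?_mk_cons]
  have gm5 : (⟨pronounsList⟩ : PySem.Dict String String).getD "himself" "" = "male" := by
      simp [pronounsList, PySem.Dict.getD, PySem.Dict.get?_mk_cons]
  have gm6 : (⟨pronounsList⟩ : PySem.Dict String String).getD "mr" "" = "male" := by
      simp [pronounsList, PySem.Dict.getD, PySem.Dict.get?_mk_cons]
  rw [hk]
  simp only [List.foldl_cons, List.foldl_nil, gf1, gf2, gf3, gf4, gf5, gf6, gf7, gf8,
    gm1, gm2, gm3, gm4, gm5, gm6]
  rw [PySem.Dict.items_eq_map_keys _ ?hnd (0 : Int)]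
  case hnd =>
    simp [PySem.Dict.keys_modify, PySem.Dict.keys_insert_of_contains, PySem.Dict.contains_modify,
      PySem.Dict.keys_mk]
    try decide
  · simp [PySem.Dict.keys_modify, PySem.Dict.keys_insert_of_contains, PySem.Dict.contains_modify,
      PySem.Dict.keys_mk, PySem.Dict.getD_modify]
    all_goals simp [PySem.Dict.getD, PySem.Dict.get?_mk_cons]

-- ===== VERDICT (by name: the statement is the Claim_ definition above) =====
theorem pronoun_count_spec : Claim_equal_pronoun_count := by
  intro text _
  unfold Spec_pronoun_count pronoun_count pronoun_count_alt
  rw [foldA_items, foldB_eq]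
  have hpred : ∀ w ∈ PySem.Str.split₀ text,
      ((!femaleList.contains w && maleList.contains w) = true ↔ maleList.contains w = true) := by
    intro w _
    cases h : maleList.contains w
    · simp
    · have hnf := male_not_female w h
      simp only [List.contains_eq_mem, decide_eq_false_iff_not] at hnf
      simp [hnf]
  have hcnt : (PySem.Str.split₀ text).countP
        (fun w => !femaleList.contains w && maleList.contains w)
      = (PySem.Str.split₀ text).countP (fun w => maleList.contains w) :=
    List.countP_congr hpred
  rw [hcnt]
  rw [countP_contains_eq_sum femaleList (by decide), countP_contains_eq_sum maleList (by decide)]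
  simp only [femaleList, maleList, List.map_cons, List.map_nil, List.sum_cons, List.sum_nil,
    PySem.Dict.getD_counter, List.cons.injEq, Prod.mk.injEq, and_true, true_and]
  constructor <;> ring
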